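-- pv_equiv track=rewrite | github.com/DrHagrid/Organic | reactions/models.py | transform
-- ===== SOURCE A (Python) =====
-- def transform(inp):
--     res = ''
--     num = ''
--     for i in range(0, len(inp)):
--         if (inp[i].isdigit()) and (inp[i-1].isalpha() or num):
--             num += inp[i]
--             if i == len(inp)-1:
--                 res += '<sub>' + num + '</sub>'
--         elif num:
--             res += '<sub>' + num + '</sub>'
--             res += inp[i]
--             num = ''
--         else:
--             res += inp[i]
--             num = ''
--     return res
-- ===== SOURCE B (Python) =====
-- def transform(inp):
--     out = []
--     n = len(inp)
--     pos = 0
--     while pos < n: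
--         if inp[pos].isdigit():
--             end = pos + 1
--             while end < n and inp[end].isdigit():
--                 end += 1
--             run = inp[pos:end]
--             if pos > 0 and inp[pos - 1].isalpha():
--                 out.append('<sub>' + run + '</sub>')
--             else:
--                 out.append(run)
--             pos = end
--         else:
--             out.append(inp[pos])
--             pos += 1
--     return ''.join(out)
-- ===== Notes on version B (the rewrite author's own statement) =====
-- stated objective: alternative
-- what changed: Replaced the per-character state machine (accumulating digits in num with an end-of-string flush) by a run-oriented scan that locates each maximal digit run, emits it wrapped in <sub>..</sub> iff it is preceded by an alphabetic character, and joins the pieces at the end.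
-- intended difference: On strings that start with a digit and end with a letter, A wraps the leading digit run in <sub>..</sub> only because inp[i-1] at i==0 wraps around to the last character; B leaves a leading digit run, which has no preceding letter, unwrapped — the intended value. — e.g. on transform("1A"): A returns "<sub>1</sub>A", B returns "1A"
import Mathlib
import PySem

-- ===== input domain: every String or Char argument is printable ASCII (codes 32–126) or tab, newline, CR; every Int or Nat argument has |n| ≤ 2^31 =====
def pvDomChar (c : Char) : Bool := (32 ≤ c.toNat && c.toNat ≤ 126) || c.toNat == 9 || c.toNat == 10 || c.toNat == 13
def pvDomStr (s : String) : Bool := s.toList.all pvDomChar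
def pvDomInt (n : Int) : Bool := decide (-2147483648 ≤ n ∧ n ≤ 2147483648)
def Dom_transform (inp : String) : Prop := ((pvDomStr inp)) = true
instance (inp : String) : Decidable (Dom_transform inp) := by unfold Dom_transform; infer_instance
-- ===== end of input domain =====

-- B replaces A's per-character digit-accumulator state machine by a run-oriented scan
-- (emit each maximal digit run at once, wrapped iff preceded by an alphabetic char);
-- on strings starting with a digit and ending with a letter the two differ (see D_ below).

def pvSub : List Char := ['<', 's', 'u', 'b', '>']
def pvEsub : List Char := ['<', '/', 's', 'u', 'b', '>']

-- ===== PORT A =====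
-- literal transliteration: for i in range(len(inp)) with state (res, num)
def transform (inp : String) : String :=
  let cs := inp.toList
  let n : Int := (cs.length : Int)
  let st := (PySem.List.pyRange 0 n 1).foldl
    (fun (st : List Char × List Char) i =>
      let res := st.1
      let num := st.2
      let c := PySem.List.pyGetD cs i ' '
      if PySem.Str.isdigit c &&
          (PySem.Str.isalpha (PySem.List.pyGetD cs (i - 1) ' ') || !num.isEmpty) then
        let num' := num ++ [c]
        if i == n - 1 then (res ++ pvSub ++ num' ++ pvEsub, num') else (res, num')
      else if !num.isEmpty then
        (res ++ pvSub ++ num ++ pvEsub ++ [c], [])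
      else
        (res ++ [c], []))
    (([] : List Char), ([] : List Char))
  String.ofList st.1

-- ===== PORT B =====
-- literal transliteration of Source B: while-loop over run starts, pieces joined at the end
def altGo (cs : List Char) (pos : Nat) : List Char :=
  if h : pos < cs.length then
    let c := cs[pos]
    if PySem.Str.isdigit c then
      let t := (cs.drop (pos + 1)).takeWhile PySem.Str.isdigit
      let run := c :: t
      (if decide (0 < pos) && PySem.Str.isalpha (cs.getD (pos - 1) ' ') then
        pvSub ++ run ++ pvEsub
      else run) ++ altGo cs (pos + 1 + t.length)
    else c :: altGo cs (pos + 1)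
  else []
termination_by cs.length - pos
decreasing_by all_goals omega

def transform_alt (inp : String) : String :=
  String.ofList (altGo inp.toList 0)

-- ===== PRECONDITION & SPEC =====
-- On strings that start with a digit and end with a letter, A wraps the leading digit run
-- in <sub>…</sub> only because inp[i-1] at i == 0 wraps around to the LAST character; B
-- leaves a leading digit run (which has no preceding letter) unwrapped, the intended value.
def D_transform (inp : String) : Prop :=
  inp.toList.head?.map PySem.Str.isdigit = some true ∧
  inp.toList.getLast?.map PySem.Str.isalpha = some true
instance (inp : String) : Decidable (D_transform inp) := by unfold D_transform; infer_instance

def Spec_transform (inp : String) (out : String) : Prop := ¬ D_transform inp → out = transform_alt inp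
instance (inp : String) (out : String) : Decidable (Spec_transform inp out) := by unfold Spec_transform; infer_instance

def pvDiffWitness_transform : String := "1A"
def pvDiffWitnessOut_transform : String × String := ("<sub>1</sub>A", "1A")

-- ===== CLAIM (what is proved, stated in full; the proofs are below) =====
def Claim_unchanged_transform : Prop := ∀ (inp : String), Dom_transform inp → Spec_transform inp (transform inp)
def Claim_changed_transform : Prop := Dom_transform (pvDiffWitness_transform) ∧ D_transform (pvDiffWitness_transform) ∧ transform (pvDiffWitness_transform) = pvDiffWitnessOut_transform.1 ∧ transform_alt (pvDiffWitness_transform) = pvDiffWitnessOut_transform.2 ∧ pvDiffWitnessOut_transform.1 ≠ pvDiffWitnessOut_transform.2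
def Claim_exact_transform : Prop := ∀ (inp : String), Dom_transform inp → D_transform inp → transform inp ≠ transform_alt inp

-- ===== LEMMAS AND PROOFS =====

-- A's loop recast on suffixes, exact mirror (flush happens at the last character)
def pvF (p : Char) (num : List Char) : List Char → List Char
  | [] => []
  | c :: rest =>
    if PySem.Str.isdigit c && (PySem.Str.isalpha p || !num.isEmpty) then
      (if rest.isEmpty then pvSub ++ (num ++ [c]) ++ pvEsub else []) ++ pvF c (num ++ [c]) rest
    else if !num.isEmpty then
      pvSub ++ num ++ pvEsub ++ c :: pvF c [] rest
    else
      c :: pvF c [] rest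

-- same machine with the flush moved to the end of input
def pvS (p : Char) (num : List Char) : List Char → List Char
  | [] => if num.isEmpty then [] else pvSub ++ num ++ pvEsub
  | c :: rest =>
    if PySem.Str.isdigit c && (PySem.Str.isalpha p || !num.isEmpty) then
      pvS c (num ++ [c]) rest
    else if !num.isEmpty then
      pvSub ++ num ++ pvEsub ++ c :: pvS c [] rest
    else
      c :: pvS c [] rest

-- the character before position pos, as B's wrap test sees it (no char → a non-letter)
def pvPrev (cs : List Char) (pos : Nat) : Char :=
  if pos = 0 then ' ' else cs.getD (pos - 1) ' '

theorem pvWrap_iff (cs : List Char) (pos : Nat) :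
    (0 < pos ∧ PySem.Str.isalpha (cs[pos - 1]?.getD ' ') = true) ↔
      PySem.Str.isalpha (pvPrev cs pos) = true := by
  cases pos with
  | zero =>
    have h0 : pvPrev cs 0 = ' ' := rfl
    rw [h0]
    constructor
    · rintro ⟨h, _⟩; exact absurd h (by omega)
    · intro h; exact absurd h (by decide)
  | succ p => simp [pvPrev, List.getD]

theorem pv_digit_not_alpha (c : Char) (h : PySem.Str.isdigit c = true) :
    PySem.Str.isalpha c = false := by
  simp only [PySem.Str.isdigit, PySem.Chars.isdigit, Bool.and_eq_true, decide_eq_true_eq] at h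
  have h9 : c ≤ '9' := h.2
  have ha : ¬ ('a' ≤ c) := fun hle => absurd (le_trans hle h9) (by decide)
  have hA : ¬ ('A' ≤ c) := fun hle => absurd (le_trans hle h9) (by decide)
  simp [PySem.Str.isalpha, PySem.Chars.isalpha, PySem.Chars.isupper, PySem.Chars.islower, ha, hA]

-- pvF and pvS agree when num is empty or input remains
theorem pvF_eq_pvS (l : List Char) : ∀ p num, (num = [] ∨ l ≠ []) → pvF p num l = pvS p num l := by
  induction l with
  | nil =>
    rintro p num (rfl | h)
    · rfl
    · exact absurd rfl h
  | cons c rest IH =>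
    intro p num _
    simp only [pvF, pvS]
    split
    · rcases eq_or_ne rest [] with rfl | hr
      · simp [pvF, pvS]
      · simp [List.isEmpty_iff, hr, IH _ _ (Or.inr hr)]
    · split
      · rcases eq_or_ne rest [] with rfl | hr
        · simp [pvF, pvS]
        · rw [IH _ _ (Or.inr hr)]
      · rcases eq_or_ne rest [] with rfl | hr
        · rfl
        · rw [IH _ _ (Or.inr hr)]

-- mid-run characterisation of pvS
theorem pvS_run (l : List Char) : ∀ p num, num ≠ [] →
    pvS p num l = pvSub ++ num ++ l.takeWhile PySem.Str.isdigit ++ pvEsub ++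
      (match l.dropWhile PySem.Str.isdigit with
       | [] => []
       | c :: r => c :: pvS c [] r) := by
  induction l with
  | nil => intro p num hn; simp [pvS, List.isEmpty_iff, hn]
  | cons c rest IH =>
    intro p num hn
    by_cases hd : PySem.Str.isdigit c = true
    · have hcond : (PySem.Str.isdigit c && (PySem.Str.isalpha p || !num.isEmpty)) = true := by
        simp [hd, hn]
      have e : pvS p num (c :: rest) = pvS c (num ++ [c]) rest := by simp [pvS, hcond]
      rw [e, IH _ _ (by simp)]
      simp [hd]
    · have hd' : PySem.Str.isdigit c = false := by simpa using hd
      simp [pvS, hd', hn]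

-- plain-run characterisation of pvS (previous char not alphabetic, no pending digits)
theorem pvS_plain (l : List Char) : ∀ p, PySem.Str.isalpha p = false →
    pvS p [] l = l.takeWhile PySem.Str.isdigit ++
      (match l.dropWhile PySem.Str.isdigit with
       | [] => []
       | c :: r => c :: pvS c [] r) := by
  induction l with
  | nil => intro p hp; simp [pvS]
  | cons c rest IH =>
    intro p hp
    by_cases hd : PySem.Str.isdigit c = true
    · have e : pvS p [] (c :: rest) = c :: pvS c [] rest := by simp [pvS, hp]
      rw [e, IH _ (pv_digit_not_alpha c hd)]
      simp [hd]
    · have hd' : PySem.Str.isdigit c = false := by simpa using hd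
      simp [pvS, hd']

-- the first character of pvS is not changed by p when it is not a digit, nor when
-- p and q look the same to the wrap test
theorem pvS_p_congr (l : List Char) (p q : Char)
    (h : PySem.Str.isalpha p = PySem.Str.isalpha q) : pvS p [] l = pvS q [] l := by
  cases l with
  | nil => rfl
  | cons c rest => simp [pvS, h]

-- A's index fold computes pvF on the corresponding suffix
theorem pvA_fold (cs : List Char) (k : Nat) : ∀ (i : Nat) (res num : List Char),
    i + k = cs.length →
    ((PySem.List.pyRange (i : Int) (cs.length : Int) 1).foldl
      (fun (st : List Char × List Char) j =>
        let res := st.1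
        let num := st.2
        let c := PySem.List.pyGetD cs j ' '
        if PySem.Str.isdigit c &&
            (PySem.Str.isalpha (PySem.List.pyGetD cs (j - 1) ' ') || !num.isEmpty) then
          let num' := num ++ [c]
          if j == (cs.length : Int) - 1 then (res ++ pvSub ++ num' ++ pvEsub, num') else (res, num')
        else if !num.isEmpty then
          (res ++ pvSub ++ num ++ pvEsub ++ [c], [])
        else
          (res ++ [c], [])) (res, num)).1
    = res ++ pvF (PySem.List.pyGetD cs ((i : Int) - 1) ' ') num (cs.drop i) := by
  induction k generalizing cs with
  | zero =>
    intro i res num hik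
    have hi : i = cs.length := by omega
    subst hi
    rw [PySem.List.pyRange_one_eq_nil le_rfl, List.drop_length]
    simp [pvF]
  | succ k IH =>
    intro i res num hik
    have hi : i < cs.length := by omega
    have hr : PySem.List.pyRange (i : Int) (cs.length : Int) 1
        = (i : Int) :: PySem.List.pyRange ((i : Int) + 1) (cs.length : Int) 1 :=
      PySem.List.pyRange_one_cons (by exact_mod_cast hi)
    have hc : PySem.List.pyGetD cs (i : Int) ' ' = cs[i] := by
      rw [PySem.List.pyGetD_natCast]
      exact List.getD_eq_getElem cs ' ' hi
    have hdrop : cs.drop i = cs[i] :: cs.drop (i + 1) := List.drop_eq_getElem_cons hi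
    have hstep : ((i : Int) + 1) = ((i + 1 : Nat) : Int) := by push_cast; ring
    have hprev : ((i + 1 : Nat) : Int) - 1 = (i : Int) := by push_cast; ring
    have hflush : ((i : Int) == (cs.length : Int) - 1) = (cs.drop (i + 1)).isEmpty := by
      by_cases hl : i + 1 = cs.length
      · have h1 : ((i : Int) == (cs.length : Int) - 1) = true := by
          simp only [beq_iff_eq]; omega
        have h2 : (cs.drop (i + 1)).isEmpty = true := by
          simp only [List.isEmpty_iff, List.drop_eq_nil_iff]; omega
        rw [h1, h2]
      · have h1 : ((i : Int) == (cs.length : Int) - 1) = false := by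
          simp only [beq_eq_false_iff_ne, ne_eq]; omega
        have h2 : (cs.drop (i + 1)).isEmpty = false := by
          simp only [List.isEmpty_eq_false_iff, ne_eq, List.drop_eq_nil_iff]; omega
        rw [h1, h2]
    rw [hr, List.foldl_cons, hstep]
    by_cases hb : (PySem.Str.isdigit cs[i] &&
        (PySem.Str.isalpha (PySem.List.pyGetD cs ((i : Int) - 1) ' ') || !num.isEmpty)) = true
    · by_cases hl : (cs.drop (i + 1)).isEmpty = true
      · have hfl : ((i : Int) == (cs.length : Int) - 1) = true := by rw [hflush]; exact hl
        have hnil : cs.drop (i + 1) = [] := List.isEmpty_iff.mp hl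
        simp only [hc, hb, hfl, if_true]
        rw [IH cs (i + 1) _ _ (by omega), hprev, hc, hdrop, hnil]
        simp [pvF, hb]
      · have hfl : ((i : Int) == (cs.length : Int) - 1) = false := by
          rw [hflush]; simpa using hl
        have hl' : (cs.drop (i + 1)).isEmpty = false := by simpa using hl
        simp only [hc, hb, hfl, if_true, Bool.false_eq_true, if_false]
        rw [IH cs (i + 1) _ _ (by omega), hprev, hc, hdrop]
        simp [pvF, hb, hl']
    · have hb' : (PySem.Str.isdigit cs[i] &&
          (PySem.Str.isalpha (PySem.List.pyGetD cs ((i : Int) - 1) ' ') || !num.isEmpty)) = false := by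
        simpa using hb
      by_cases hn : num.isEmpty = true
      · simp only [hc, hn, Bool.not_true, Bool.false_eq_true, if_false]
        rw [IH cs (i + 1) _ _ (by omega), hprev, hc, hdrop]
        simp [pvF, hn]
        by_cases hdig : PySem.Str.isdigit cs[i] = true
        · have hal : PySem.Str.isalpha (PySem.List.pyGetD cs ((i : Int) - 1) ' ') = false := by
            simpa [hdig, hn] using hb'
          simp [hdig, hal]
        · have hd0 : PySem.Str.isdigit cs[i] = false := by simpa using hdig
          simp [hd0]
      · have hn' : num.isEmpty = false := by simpa using hn
        have hd0 : PySem.Str.isdigit cs[i] = false := by simpa [hn'] using hb'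
        simp only [hc, hn', Bool.not_false, if_true]
        rw [IH cs (i + 1) _ _ (by omega), hprev, hc, hdrop]
        simp [pvF, hd0, hn']

theorem pv_dropWhile_head_false (p : Char → Bool) : ∀ (l : List Char) (c : Char) (r : List Char),
    l.dropWhile p = c :: r → p c = false := by
  intro l
  induction l with
  | nil => intro c r h; simp [List.dropWhile] at h
  | cons x xs IHl =>
    intro c r h
    by_cases hx : p x = true
    · rw [List.dropWhile_cons_of_pos hx] at h
      exact IHl _ _ h
    · have hx' : p x = false := by simpa using hx
      rw [List.dropWhile_cons_of_neg (by simp [hx'])] at h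
      injection h with h1 _
      rw [← h1]; exact hx'

theorem altGo_stop (cs : List Char) (pos : Nat) (h : cs.length ≤ pos) : altGo cs pos = [] := by
  rw [altGo.eq_def, dif_neg (by omega)]

theorem altGo_nondigit (cs : List Char) (pos : Nat) (hlt : pos < cs.length)
    (hd : PySem.Str.isdigit cs[pos] = false) :
    altGo cs pos = cs[pos] :: altGo cs (pos + 1) := by
  rw [altGo.eq_def, dif_pos hlt]
  simp [hd]

theorem altGo_digit (cs : List Char) (pos : Nat) (hlt : pos < cs.length)
    (hd : PySem.Str.isdigit cs[pos] = true) :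
    altGo cs pos =
      (if PySem.Str.isalpha (pvPrev cs pos) then
        pvSub ++ (cs[pos] :: (cs.drop (pos + 1)).takeWhile PySem.Str.isdigit) ++ pvEsub
      else
        cs[pos] :: (cs.drop (pos + 1)).takeWhile PySem.Str.isdigit)
      ++ altGo cs (pos + 1 + ((cs.drop (pos + 1)).takeWhile PySem.Str.isdigit).length) := by
  rw [altGo.eq_def, dif_pos hlt]
  simp [hd, pvWrap_iff]

-- B's while-loop computes pvS on the corresponding suffix
theorem pvB_go (cs : List Char) (k : Nat) : ∀ (pos : Nat), pos ≤ cs.length → cs.length - pos = k →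
    altGo cs pos = pvS (pvPrev cs pos) [] (cs.drop pos) := by
  induction k using Nat.strong_induction_on with
  | _ k IH =>
    intro pos hpos hk
    rcases eq_or_lt_of_le hpos with heq | hlt
    · rw [heq, altGo_stop cs cs.length le_rfl, List.drop_length]
      simp [pvS]
    · have hdrop : cs.drop pos = cs[pos] :: cs.drop (pos + 1) := List.drop_eq_getElem_cons hlt
      by_cases hd : PySem.Str.isdigit cs[pos] = true
      · -- digit run starting at pos
        have htle : ((cs.drop (pos + 1)).takeWhile PySem.Str.isdigit).length ≤ cs.length - (pos + 1) := by
          have h0 := (List.takeWhile_prefix (l := cs.drop (pos + 1)) (p := PySem.Str.isdigit)).length_le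
          simpa [List.length_drop] using h0
        have heend : pos + 1 + ((cs.drop (pos + 1)).takeWhile PySem.Str.isdigit).length ≤ cs.length := by
          omega
        have hdw : (cs.drop (pos + 1)).dropWhile PySem.Str.isdigit
            = cs.drop (pos + 1 + ((cs.drop (pos + 1)).takeWhile PySem.Str.isdigit).length) := by
          have hsplit := List.takeWhile_append_dropWhile (p := PySem.Str.isdigit) (l := cs.drop (pos + 1))
          calc (cs.drop (pos + 1)).dropWhile PySem.Str.isdigit
              = ((cs.drop (pos + 1)).takeWhile PySem.Str.isdigit ++
                  (cs.drop (pos + 1)).dropWhile PySem.Str.isdigit).drop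
                  ((cs.drop (pos + 1)).takeWhile PySem.Str.isdigit).length := List.drop_left.symm
            _ = (cs.drop (pos + 1)).drop ((cs.drop (pos + 1)).takeWhile PySem.Str.isdigit).length := by
                rw [hsplit]
            _ = cs.drop (pos + 1 + ((cs.drop (pos + 1)).takeWhile PySem.Str.isdigit).length) := by
                rw [List.drop_drop]
        have hIH := IH (cs.length - (pos + 1 + ((cs.drop (pos + 1)).takeWhile PySem.Str.isdigit).length))
          (by omega) (pos + 1 + ((cs.drop (pos + 1)).takeWhile PySem.Str.isdigit).length) heend rfl
        have hKeq : altGo cs (pos + 1 + ((cs.drop (pos + 1)).takeWhile PySem.Str.isdigit).length)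
            = (match (cs.drop (pos + 1)).dropWhile PySem.Str.isdigit with
               | [] => []
               | c :: r => c :: pvS c [] r) := by
          rw [hIH, hdw]
          cases hE : cs.drop (pos + 1 + ((cs.drop (pos + 1)).takeWhile PySem.Str.isdigit).length) with
          | nil => simp [pvS]
          | cons c' r' =>
            have hlt2 : pos + 1 + ((cs.drop (pos + 1)).takeWhile PySem.Str.isdigit).length < cs.length := by
              by_contra hge
              rw [List.drop_eq_nil_of_le (by omega)] at hE
              simp at hE
            have hE2 := List.drop_eq_getElem_cons hlt2
            rw [hE] at hE2
            injection hE2 with he1 he2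
            have hnd : PySem.Str.isdigit c' = false := by
              apply pv_dropWhile_head_false PySem.Str.isdigit (cs.drop (pos + 1)) c' r'
              rw [hdw, hE]
            simp [pvS, hnd]
        by_cases ha : PySem.Str.isalpha (pvPrev cs pos) = true
        · rw [altGo_digit cs pos hlt hd, if_pos ha, hKeq, hdrop]
          have e : pvS (pvPrev cs pos) [] (cs[pos] :: cs.drop (pos + 1))
              = pvS cs[pos] [cs[pos]] (cs.drop (pos + 1)) := by
            simp [pvS, hd, ha]
          rw [e, pvS_run (cs.drop (pos + 1)) cs[pos] [cs[pos]] (by simp), hdw]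
          simp
        · have ha' : PySem.Str.isalpha (pvPrev cs pos) = false := by
            simpa using ha
          have h1 : (cs.drop pos).takeWhile PySem.Str.isdigit
              = cs[pos] :: (cs.drop (pos + 1)).takeWhile PySem.Str.isdigit := by
            rw [hdrop, List.takeWhile_cons_of_pos hd]
          have h2 : (cs.drop pos).dropWhile PySem.Str.isdigit
              = (cs.drop (pos + 1)).dropWhile PySem.Str.isdigit := by
            rw [hdrop, List.dropWhile_cons_of_pos hd]
          rw [altGo_digit cs pos hlt hd, if_neg (by simp [ha']), hKeq,
            pvS_plain (cs.drop pos) _ ha', h1, h2]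
      · -- non-digit character
        have hd' : PySem.Str.isdigit cs[pos] = false := by simpa using hd
        have hp : pvPrev cs (pos + 1) = cs[pos] := by
          simp [pvPrev, List.getD, List.getElem?_eq_getElem hlt]
        rw [altGo_nondigit cs pos hlt hd',
          IH (cs.length - (pos + 1)) (by omega) (pos + 1) (by omega) rfl, hp, hdrop]
        simp [pvS, hd']

-- both ports, as the list machines on the whole string
theorem transform_eq_pvF (inp : String) :
    transform inp = String.ofList
      (pvF (PySem.List.pyGetD inp.toList (-1) ' ') [] inp.toList) := by
  have hA := pvA_fold inp.toList inp.toList.length 0 [] [] (by omega)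
  simp only [Nat.cast_zero, List.drop_zero, List.nil_append, zero_sub] at hA
  simp only [transform]
  rw [hA]

theorem transform_alt_eq_pvS (inp : String) :
    transform_alt inp = String.ofList (pvS ' ' [] inp.toList) := by
  have hB := pvB_go inp.toList inp.toList.length 0 (by omega) (by omega)
  simp only [List.drop_zero] at hB
  simp only [transform_alt]
  rw [hB]
  rfl

-- ===== VERDICT (by name: the statement is the Claim_ definition above) =====
theorem transform_spec : Claim_unchanged_transform := by
  intro inp _
  unfold Spec_transform
  intro hD
  rw [transform_eq_pvF, transform_alt_eq_pvS]
  cases hcs : inp.toList with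
  | nil => rfl
  | cons c rest =>
    rw [pvF_eq_pvS _ _ _ (Or.inr (by simp))]
    by_cases hd : PySem.Str.isdigit c = true
    · have hne : c :: rest ≠ [] := by simp
      have hlast : PySem.List.pyGetD (c :: rest) (-1) ' ' = (c :: rest).getLast hne :=
        PySem.List.pyGetD_neg_one (c :: rest) ' ' hne
      have hal : PySem.Str.isalpha ((c :: rest).getLast hne) = false := by
        by_contra h
        apply hD
        constructor
        · rw [hcs]; simp [hd]
        · rw [hcs, List.getLast?_eq_some_getLast hne]
          simp only [Option.map_some, Option.some.injEq]
          simpa using h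
      rw [hlast]
      exact congrArg String.ofList (pvS_p_congr _ _ _ (by rw [hal]; decide))
    · have hd' : PySem.Str.isdigit c = false := by simpa using hd
      exact congrArg String.ofList (by simp [pvS, hd'])

theorem transform_changed : Claim_changed_transform := by
  unfold Claim_changed_transform
  refine ⟨by decide, by decide, by decide, ?_, by decide⟩
  rw [transform_alt_eq_pvS]
  decide

theorem transform_tight : Claim_exact_transform := by
  intro inp _ hD heq
  obtain ⟨h1, h2⟩ := hD
  rw [transform_eq_pvF, transform_alt_eq_pvS] at heq
  cases hcs : inp.toList with
  | nil => rw [hcs] at h1; simp at h1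
  | cons c rest =>
    rw [hcs] at h1 h2 heq
    have hd : PySem.Str.isdigit c = true := by simpa using h1
    have hne : c :: rest ≠ [] := by simp
    have hal : PySem.Str.isalpha ((c :: rest).getLast hne) = true := by
      rw [List.getLast?_eq_some_getLast hne] at h2
      simpa using h2
    have hlast : PySem.List.pyGetD (c :: rest) (-1) ' ' = (c :: rest).getLast hne :=
      PySem.List.pyGetD_neg_one (c :: rest) ' ' hne
    rw [pvF_eq_pvS _ _ _ (Or.inr hne), hlast] at heq
    have hAside : pvS ((c :: rest).getLast hne) [] (c :: rest)
        = pvS c [c] rest := by simp [pvS, hd, hal]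
    have hBside : pvS ' ' [] (c :: rest) = c :: pvS c [] rest := by
      have : PySem.Str.isalpha ' ' = false := by decide
      simp [pvS, this]
    rw [hAside, hBside, pvS_run rest c [c] (by simp)] at heq
    have hlists := congrArg String.toList heq
    simp only [String.toList_ofList] at hlists
    have hhead : '<' = c := by
      have := congrArg (fun l => l.head?) hlists
      simpa [pvSub] using this
    rw [← hhead] at hd
    exact absurd hd (by decide)
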